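-- pv_equiv track=rewrite | github.com/YoussefSNK/BTS_PROJET_1 | routes/pearls.py | remove_common_elements
-- ===== SOURCE A (Python) =====
-- def remove_common_elements(d: dict) -> dict:
--     """
--     Pour le dictionnaire d, la fonction parcourt la première liste associée à la première clé.
--     Pour chaque entier n de cette liste, si n est présent dans toutes les autres listes,
--     alors on retire de chaque liste le nombre minimal d'occurrences de n parmi toutes.
--
--     Exemple :
--       'H70': [2, 2, 3, 3, 3, 3, 3, 5, 7],
--       'H106': [2, 2, 2, 3, 3, 3, 3, 23],
--       'H77': [2, 2, 2, 3, 3, 3, 3, 7, 23]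
--
--     devient
--
--       'H70': [3, 5, 7],
--       'H106': [2, 23],
--       'H77': [2, 7, 23]
--     """
--     # Récupérer la liste des clés du dictionnaire
--     keys = list(d.keys())
--     if not keys:
--         return d  # dictionnaire vide
--
--     # Clé de référence : la première
--     base_key = keys[0]
--
--     # Pour chaque valeur unique de la première liste
--     for n in set(d[base_key]):
--         # Vérifier que n est présent dans toutes les autres listes
--         if all(n in d[k] for k in keys[1:]):
--             # Calculer le nombre minimal d'occurrences de n dans toutes les listes
--             min_occurrences = min(lst.count(n) for lst in d.values())
--             # Supprimer min_occurrences de n dans chaque liste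
--             for key in keys:
--                 for _ in range(min_occurrences):
--                     d[key].remove(n)
--     return d
-- ===== SOURCE B (Python) =====
-- def remove_common_elements(d: dict) -> dict:
--     """Intersection-multiset approach: build the min shared count of every value in one
--     sweep over the lists, then filter each list in one order-preserving pass with a
--     per-list drop budget (lists are mutated in place via slice assignment, as in A)."""
--     items = list(d.items())
--     if not items:
--         return d
--     # multiset intersection of all the lists: common[x] = min count of x over all lists
--     common = {}
--     for x in items[0][1]:
--         common[x] = common.get(x, 0) + 1
--     for _, lst in items[1:]:
--         nxt = {}
--         for x in lst:
--             if nxt.get(x, 0) < common.get(x, 0):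
--                 nxt[x] = nxt.get(x, 0) + 1
--         common = nxt
--     # one pass per list: drop the first common[x] occurrences of each x
--     for _, lst in items:
--         budget = dict(common)
--         kept = []
--         for x in lst:
--             b = budget.get(x, 0)
--             if b > 0:
--                 budget[x] = b - 1
--             else:
--                 kept.append(x)
--         lst[:] = kept
--     return d
-- ===== Notes on version B (the rewrite author's own statement) =====
-- stated objective: alternative
-- what changed: A iterates over the distinct values of the first list, re-scanning every other list per value (all/in, min of counts) and deleting occurrences with repeated list.remove; B instead builds the multiset intersection of all the lists (min shared count per value) in one sweep and then rewrites each list in a single order-preserving pass with a per-list drop-budget dict.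
import Mathlib
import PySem

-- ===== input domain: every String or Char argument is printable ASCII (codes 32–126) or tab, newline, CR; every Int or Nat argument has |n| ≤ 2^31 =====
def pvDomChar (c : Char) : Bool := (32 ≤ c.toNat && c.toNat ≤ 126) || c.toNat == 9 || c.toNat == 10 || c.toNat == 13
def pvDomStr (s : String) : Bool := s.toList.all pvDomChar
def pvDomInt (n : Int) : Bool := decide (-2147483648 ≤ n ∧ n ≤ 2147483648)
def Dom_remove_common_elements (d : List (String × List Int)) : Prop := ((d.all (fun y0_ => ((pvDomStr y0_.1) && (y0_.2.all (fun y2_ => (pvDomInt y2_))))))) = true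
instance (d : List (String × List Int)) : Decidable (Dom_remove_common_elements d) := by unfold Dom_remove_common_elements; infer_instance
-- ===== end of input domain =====

-- B replaces A's per-value membership/min/count scans and repeated .remove deletions by one
-- multiset-intersection sweep plus a single budgeted pass per list (an alternative
-- decomposition, not claimed faster; return-value equivalence only: both Pythons mutate
-- d's lists in place, B via slice assignment, exactly as A does).

-- ===== PORT A =====
-- d[k] (first match; the none branch is unreachable in A's uses, k is always a key of d)
def pvLookupA (d : List (String × List Int)) (k : String) : List Int :=
  match d.find? (fun p => p.1 == k) with
  | some p => p.2
  | none => []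

-- d[key].remove(n): drop the first occurrence of n in the entry of key (ValueError unreachable
-- in A — remove is called count-many times at most — so getD keeps the list)
def pvRemoveOnceA (d : List (String × List Int)) (key : String) (n : Int) : List (String × List Int) :=
  d.map (fun p => if p.1 == key then (p.1, (PySem.List.remove? p.2 n).getD p.2) else p)

def remove_common_elements (d : List (String × List Int)) : List (String × List Int) :=
  match d with
  | [] => d                                     -- if not keys: return d
  | (k0, l0) :: rest =>
      let keys : List String := k0 :: rest.map Prod.fst     -- keys = list(d.keys())
      -- for n in set(d[base_key]):
      (PySem.Set.ofList (pvLookupA ((k0, l0) :: rest) k0)).foldl (fun dd n =>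
        -- if all(n in d[k] for k in keys[1:]):
        if (PySem.List.slice keys (some 1) none).all (fun k => (pvLookupA dd k).contains n) then
          -- min_occurrences = min(lst.count(n) for lst in d.values())
          let min_occ : Int :=
            (PySem.List.min? (dd.map (fun p => (p.2.count n : Int))) (fun x => x)).getD 0
          -- for key in keys: for _ in range(min_occurrences): d[key].remove(n)
          keys.foldl (fun dd key =>
            (PySem.List.pyRange 0 min_occ 1).foldl (fun dd _ => pvRemoveOnceA dd key n) dd) dd
        else dd) ((k0, l0) :: rest)

-- ===== PORT B =====
-- common[x] = common.get(x, 0) + 1 over the first list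
def pvCounterOf (l : List Int) : PySem.Dict Int Int :=
  l.foldl (fun c x => c.insert x (c.getD x 0 + 1)) PySem.Dict.empty

-- one intersection step: nxt[x] = min(common[x], lst.count(x)), built by capped counting
def pvInterStep (common : PySem.Dict Int Int) (lst : List Int) : PySem.Dict Int Int :=
  lst.foldl (fun nxt x =>
    if nxt.getD x 0 < common.getD x 0 then nxt.insert x (nxt.getD x 0 + 1) else nxt)
    PySem.Dict.empty

-- one pass with a drop budget: skip the first common[x] occurrences of each x, keep the rest
def pvBudgetPass (common : PySem.Dict Int Int) (lst : List Int) : List Int :=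
  (lst.foldl (fun (s : PySem.Dict Int Int × List Int) x =>
      let b := s.1.getD x 0
      if 0 < b then (s.1.insert x (b - 1), s.2) else (s.1, s.2 ++ [x]))
    (common, [])).2

def remove_common_elements_alt (d : List (String × List Int)) : List (String × List Int) :=
  match d with
  | [] => d
  | (_, l0) :: rest =>
      let common := rest.foldl (fun c p => pvInterStep c p.2) (pvCounterOf l0)
      d.map (fun p => (p.1, pvBudgetPass common p.2))

-- ===== PRECONDITION & SPEC =====
-- Pre_ excludes association lists with duplicate keys: those do not represent a Python dict
-- (A's parameter type), so A is never run on them.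
def Pre_remove_common_elements (d : List (String × List Int)) : Prop :=
  (d.map Prod.fst).Nodup
instance (d : List (String × List Int)) : Decidable (Pre_remove_common_elements d) := by
  unfold Pre_remove_common_elements; infer_instance

def pvWitness_remove_common_elements : (List (String × List Int)) :=
  [("H70", [2, 2, 3, 3, 3, 3, 3, 5, 7]), ("H106", [2, 2, 2, 3, 3, 3, 3, 23]), ("H77", [2, 2, 2, 3, 3, 3, 3, 7, 23])]

def Spec_remove_common_elements (d : List (String × List Int)) (out : List (String × List Int)) : Prop := out = remove_common_elements_alt d
instance (d : List (String × List Int)) (out : List (String × List Int)) : Decidable (Spec_remove_common_elements d out) := by unfold Spec_remove_common_elements; infer_instance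

-- ===== CLAIM (what is proved, stated in full; the proofs are below) =====
def Claim_equal_remove_common_elements : Prop := ∀ (d : List (String × List Int)), Dom_remove_common_elements d → Pre_remove_common_elements d → Spec_remove_common_elements d (remove_common_elements d)

-- ===== LEMMAS AND PROOFS =====

-- Common semantic core: keep a list, dropping the first (b x) occurrences of each value x.
def pvKeep (b : Int → Nat) : List Int → List Int
  | [] => []
  | x :: xs => if 0 < b x then pvKeep (fun y => if y = x then b x - 1 else b y) xs else x :: pvKeep b xs

def pvSingle (n : Int) (m : Nat) : Int → Nat := fun x => if x = n then m else 0

-- the minimum count of x over all the lists (first list as the start of the min-fold)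
def pvMC (l0 : List Int) (ls : List (List Int)) (x : Int) : Nat :=
  ls.foldl (fun m l => min m (l.count x)) (l0.count x)

theorem pvKeep_zero (l : List Int) : pvKeep (fun _ => 0) l = l := by
  induction l with
  | nil => rfl
  | cons x xs ih => simp [pvKeep, ih]

theorem pvKeep_comp (l : List Int) (b b' : Int → Nat) :
    pvKeep b' (pvKeep b l) = pvKeep (fun x => b x + b' x) l := by
  induction l generalizing b b' with
  | nil => rfl
  | cons x xs ih =>
    by_cases hb : 0 < b x
    · have h2 : 0 < b x + b' x := by omega
      simp only [pvKeep, if_pos hb, if_pos h2, ih]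
      congr 1
      funext y
      by_cases hy : y = x <;> simp [hy] <;> omega
    · by_cases hb' : 0 < b' x
      · have h2 : 0 < b x + b' x := by omega
        simp only [pvKeep, if_neg hb, if_pos hb', if_pos h2, ih]
        congr 1
        funext y
        by_cases hy : y = x <;> simp [hy] <;> omega
      · have h2 : ¬ 0 < b x + b' x := by omega
        simp only [pvKeep, if_neg hb, if_neg hb', if_neg h2, ih]

theorem pvKeep_count (l : List Int) (b : Int → Nat) (n : Int) (h : b n = 0) :
    (pvKeep b l).count n = l.count n := by
  induction l generalizing b with
  | nil => rfl
  | cons x xs ih =>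
    by_cases hb : 0 < b x
    · have hxn : x ≠ n := by intro e; rw [e, h] at hb; omega
      rw [pvKeep, if_pos hb, List.count_cons]
      have : (fun y => if y = x then b x - 1 else b y) n = 0 := by simp [hxn.symm, h]
      rw [ih _ this]
      simp [hxn]
    · rw [pvKeep, if_neg hb, List.count_cons, List.count_cons, ih _ h]

theorem rm1_eq (l : List Int) (n : Int) :
    (PySem.List.remove? l n).getD l = pvKeep (pvSingle n 1) l := by
  induction l with
  | nil => rfl
  | cons x xs ih =>
    by_cases hx : x = n
    · subst hx
      have h1 : 0 < pvSingle x 1 x := by simp [pvSingle]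
      have hz : (fun y => if y = x then pvSingle x 1 x - 1 else pvSingle x 1 y) = (fun _ => 0) := by
        funext y
        by_cases hy : y = x <;> simp [pvSingle, hy]
      rw [PySem.List.remove?_cons_self, pvKeep, if_pos h1, hz, pvKeep_zero]
      rfl
    · have hk : pvKeep (pvSingle n 1) (x :: xs) = x :: pvKeep (pvSingle n 1) xs := by
        rw [pvKeep, if_neg (by simp [pvSingle, hx])]
      rw [hk, ← ih, PySem.List.remove?_cons_of_ne xs hx]
      · cases h : PySem.List.remove? xs n with
        | none => simp [h]
        | some l' => simp [h]

theorem rm1_iter (l : List Int) (n : Int) (m : Nat) :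
    (fun l => (PySem.List.remove? l n).getD l)^[m] l = pvKeep (pvSingle n m) l := by
  induction m generalizing l with
  | zero =>
    have hz : pvSingle n 0 = (fun _ => 0) := by funext y; simp [pvSingle]
    rw [Function.iterate_zero, hz, pvKeep_zero]
    rfl
  | succ m ih =>
    rw [Function.iterate_succ_apply]
    rw [rm1_eq, ih, pvKeep_comp]
    congr 1
    funext y
    by_cases hy : y = n <;> simp [pvSingle, hy] <;> omega

-- the shape of A's in-place update of one entry
def pvUpd (g : List Int → List Int) (k : String) (dd : List (String × List Int)) : List (String × List Int) :=
  dd.map (fun p => if p.1 == k then (p.1, g p.2) else p)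

theorem pvUpd_pvUpd (g h : List Int → List Int) (k : String) (dd : List (String × List Int)) :
    pvUpd g k (pvUpd h k dd) = pvUpd (fun l => g (h l)) k dd := by
  simp only [pvUpd, List.map_map]
  congr 1
  funext p
  by_cases hp : p.1 = k <;> simp [Function.comp, hp]

theorem pvUpd_iter (g : List Int → List Int) (k : String) (dd : List (String × List Int)) (m : Nat) :
    (fun dd => pvUpd g k dd)^[m] dd = pvUpd (g^[m]) k dd := by
  induction m generalizing dd with
  | zero => simp [pvUpd]
  | succ m ih =>
    rw [Function.iterate_succ_apply]
    have h2 : (fun l => g^[m] (g l)) = g^[m + 1] := by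
      funext l
      rw [Function.iterate_succ_apply]
    rw [ih, pvUpd_pvUpd, h2]

theorem foldl_const_iterate {α β : Type} (xs : List β) (f : α → α) (a : α) :
    xs.foldl (fun s _ => f s) a = f^[xs.length] a := by
  induction xs generalizing a with
  | nil => rfl
  | cons x t ih => rw [List.foldl_cons, ih, List.length_cons, Function.iterate_succ_apply]

theorem foldl_pvUpd (ks : List String) (g : List Int → List Int) (dd : List (String × List Int))
    (h : ks.Nodup) :
    ks.foldl (fun dd k => pvUpd g k dd) dd
      = dd.map (fun p => if p.1 ∈ ks then (p.1, g p.2) else p) := by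
  induction ks generalizing dd with
  | nil => simp
  | cons k t ih =>
    obtain ⟨hk, ht⟩ := List.nodup_cons.mp h
    rw [List.foldl_cons, ih _ ht]
    simp only [pvUpd, List.map_map]
    congr 1
    funext p
    by_cases hp : p.1 = k
    · simp [Function.comp, hp, hk]
    · by_cases hpt : p.1 ∈ t <;> simp [Function.comp, hp, hpt]

theorem lookup_map_nodup (orig : List (String × List Int)) (g : List Int → List Int)
    (p : String × List Int) (hnd : (orig.map Prod.fst).Nodup) (hp : p ∈ orig) :
    pvLookupA (orig.map (fun q => (q.1, g q.2))) p.1 = g p.2 := by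
  induction orig with
  | nil => cases hp
  | cons q t ih =>
    rw [List.map_cons, List.nodup_cons] at hnd
    obtain ⟨hq, ht⟩ := hnd
    rcases List.mem_cons.mp hp with rfl | hp'
    · simp [pvLookupA, List.find?]
    · have hne : (q.1 == p.1) = false := by
        rw [beq_eq_false_iff_ne]
        intro e
        exact hq (e ▸ List.mem_map_of_mem hp')
      simp only [List.map_cons, pvLookupA, List.find?]
      rw [hne]
      exact ih ht hp'

theorem minFold_le_init (ls : List (List Int)) (x : Int) (c : Nat) :
    ls.foldl (fun m l => min m (l.count x)) c ≤ c := by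
  induction ls generalizing c with
  | nil => exact le_refl c
  | cons l t ih => exact le_trans (ih _) (min_le_left _ _)

theorem minFold_le_mem (ls : List (List Int)) (x : Int) (l : List Int) (hl : l ∈ ls) :
    ∀ c, ls.foldl (fun m l => min m (l.count x)) c ≤ l.count x := by
  induction ls with
  | nil => cases hl
  | cons h t ih =>
    intro c
    rw [List.foldl_cons]
    rcases List.mem_cons.mp hl with rfl | hl'
    · exact le_trans (minFold_le_init t x _) (min_le_right _ _)
    · exact ih hl' _

theorem minFold_cast (ls : List (List Int)) (x : Int) (c : Nat) :
    ((ls.foldl (fun m l => min m (l.count x)) c : Nat) : Int)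
      = ls.foldl (fun m l => min m ((l.count x : Nat) : Int)) (c : Int) := by
  induction ls generalizing c with
  | nil => rfl
  | cons l t ih =>
    rw [List.foldl_cons, List.foldl_cons, ih, Nat.cast_min]

-- ===== B-side characterisation =====
theorem pvBudgetPass_aux (lst : List Int) (c : PySem.Dict Int Int) (acc : List Int) :
    (lst.foldl (fun (s : PySem.Dict Int Int × List Int) x =>
        let b := s.1.getD x 0
        if 0 < b then (s.1.insert x (b - 1), s.2) else (s.1, s.2 ++ [x])) (c, acc)).2
      = acc ++ pvKeep (fun x => (c.getD x 0).toNat) lst := by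
  induction lst generalizing c acc with
  | nil => simp [pvKeep]
  | cons x t ih =>
    rw [List.foldl_cons]
    dsimp only
    by_cases hb : 0 < c.getD x 0
    · rw [if_pos hb]
      rw [ih]
      have hbudget : (fun y => ((c.insert x (c.getD x 0 - 1)).getD y 0).toNat)
          = (fun y => if y = x then (c.getD x 0).toNat - 1 else (c.getD y 0).toNat) := by
        funext y
        rw [PySem.Dict.getD_insert]
        by_cases hy : y = x <;> simp [hy] <;> omega
      rw [hbudget, pvKeep, if_pos (by omega)]
    · rw [if_neg hb]
      rw [ih, pvKeep, if_neg (by omega), List.append_assoc]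
      rfl

theorem pvInter_aux (lst : List Int) (common nxt : PySem.Dict Int Int) (x : Int)
    (h0 : 0 ≤ nxt.getD x 0) (h1 : nxt.getD x 0 ≤ common.getD x 0) :
    (lst.foldl (fun nxt x =>
        if nxt.getD x 0 < common.getD x 0 then nxt.insert x (nxt.getD x 0 + 1) else nxt) nxt).getD x 0
      = min (common.getD x 0) (nxt.getD x 0 + lst.count x) := by
  induction lst generalizing nxt with
  | nil => simp; omega
  | cons y t ih =>
    rw [List.foldl_cons]
    by_cases hy : nxt.getD y 0 < common.getD y 0
    · rw [if_pos hy]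
      by_cases hxy : x = y
      · subst hxy
        have h := ih (nxt.insert x (nxt.getD x 0 + 1))
          (by rw [PySem.Dict.getD_insert_self]; omega)
          (by rw [PySem.Dict.getD_insert_self]; omega)
        rw [h, PySem.Dict.getD_insert_self, List.count_cons_self]
        push_cast
        omega
      · have h := ih (nxt.insert y (nxt.getD y 0 + 1))
          (by rw [PySem.Dict.getD_insert, if_neg hxy]; omega)
          (by rw [PySem.Dict.getD_insert, if_neg hxy]; omega)
        rw [h, PySem.Dict.getD_insert, if_neg hxy]
        simp [List.count_cons, Ne.symm hxy]
    · rw [if_neg hy]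
      by_cases hxy : x = y
      · subst hxy
        rw [ih nxt h0 h1, List.count_cons_self]
        push_cast
        omega
      · rw [ih nxt h0 h1]
        simp [List.count_cons, Ne.symm hxy]

theorem pvInterStep_getD (common : PySem.Dict Int Int) (lst : List Int) (x : Int)
    (h : 0 ≤ common.getD x 0) :
    (pvInterStep common lst).getD x 0 = min (common.getD x 0) ((lst.count x : Nat) : Int) := by
  unfold pvInterStep
  rw [pvInter_aux lst common PySem.Dict.empty x (by rw [PySem.Dict.getD_empty]) (by rw [PySem.Dict.getD_empty]; exact h)]
  rw [PySem.Dict.getD_empty]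
  ring_nf

theorem common_getD (l0 : List Int) (rest : List (String × List Int)) (x : Int) :
    (rest.foldl (fun c p => pvInterStep c p.2) (pvCounterOf l0)).getD x 0
      = ((pvMC l0 (rest.map Prod.snd) x : Nat) : Int) := by
  have aux : ∀ (t : List (String × List Int)) (c : PySem.Dict Int Int) (m : Nat),
      c.getD x 0 = (m : Int) →
      (t.foldl (fun c p => pvInterStep c p.2) c).getD x 0
        = (((t.map Prod.snd).foldl (fun m l => min m (l.count x)) m : Nat) : Int) := by
    intro t
    induction t with
    | nil => intro c m hc; simpa using hc
    | cons p tt ih =>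
      intro c m hc
      rw [List.foldl_cons, List.map_cons, List.foldl_cons]
      apply ih
      rw [pvInterStep_getD _ _ _ (by rw [hc]; positivity), hc, Nat.cast_min]
  unfold pvMC
  apply aux
  unfold pvCounterOf
  rw [PySem.Dict.getD_foldl_insert_add_one, PySem.Dict.getD_empty]
  simp

-- ===== A-side loop invariant =====
-- the body of A's outer loop, as a named function (definitionally equal to the port's lambda)
def pvStepA (k0 : String) (rest : List (String × List Int))
    (dd : List (String × List Int)) (n : Int) : List (String × List Int) :=
  if (PySem.List.slice (k0 :: rest.map Prod.fst) (some 1) none).all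
      (fun k => (pvLookupA dd k).contains n) then
    let min_occ : Int :=
      (PySem.List.min? (dd.map (fun p => (p.2.count n : Int))) (fun x => x)).getD 0
    (k0 :: rest.map Prod.fst).foldl (fun dd key =>
      (PySem.List.pyRange 0 min_occ 1).foldl (fun dd _ => pvRemoveOnceA dd key n) dd) dd
  else dd

theorem loopA_invariant (k0 : String) (l0 : List Int) (rest : List (String × List Int))
    (hnd : ((((k0, l0) :: rest) : List (String × List Int)).map Prod.fst).Nodup)
    (s : List Int) (b : Int → Nat) (hs : s.Nodup) (hb : ∀ n ∈ s, b n = 0) :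
    s.foldl (pvStepA k0 rest)
      (((k0, l0) :: rest).map (fun p => (p.1, pvKeep b p.2)))
      = ((k0, l0) :: rest).map (fun p =>
          (p.1, pvKeep (fun x => b x + if x ∈ s then pvMC l0 (rest.map Prod.snd) x else 0) p.2)) := by
  induction s generalizing b with
  | nil =>
    rw [List.foldl_nil]
    have hbud : (fun x => b x + if x ∈ ([] : List Int) then pvMC l0 (rest.map Prod.snd) x else 0) = b := by
      funext x
      simp
    rw [hbud]
  | cons n t ih =>
    obtain ⟨hnt, ht⟩ := List.nodup_cons.mp hs
    have hbn : b n = 0 := hb n List.mem_cons_self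
    have hbt : ∀ m ∈ t, b m = 0 := fun m hm => hb m (List.mem_cons_of_mem _ hm)
    have hndk : (k0 :: rest.map Prod.fst).Nodup := by simpa using hnd
    -- counts of n are unchanged by the removals done so far
    have hcnt : ∀ p ∈ ((k0, l0) :: rest), (pvKeep b p.2).count n = p.2.count n :=
      fun p _ => pvKeep_count _ _ _ hbn
    -- the value of min(lst.count(n) for lst in d.values()) on the current state
    have hmin : (PySem.List.min? ((((k0, l0) :: rest).map (fun p => (p.1, pvKeep b p.2))).map
          (fun p => (p.2.count n : Int))) (fun x => x)).getD 0
        = ((pvMC l0 (rest.map Prod.snd) n : Nat) : Int) := by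
      rw [List.map_map]
      rw [List.map_congr_left (fun p hp => by
        show ((fun p => ((p.2.count n : Nat) : Int)) ∘ (fun p => (p.1, pvKeep b p.2))) p
            = ((p.2.count n : Nat) : Int)
        simp only [Function.comp_apply]
        rw [hcnt p hp])]
      rw [List.map_cons, PySem.List.min?_id_cons, Option.getD_some]
      unfold pvMC
      rw [minFold_cast, List.foldl_map, List.foldl_map]
    rw [List.foldl_cons]
    have hstep : pvStepA k0 rest (((k0, l0) :: rest).map (fun p => (p.1, pvKeep b p.2))) n
        = ((k0, l0) :: rest).map (fun p =>
            (p.1, pvKeep (fun x => b x + pvSingle n (pvMC l0 (rest.map Prod.snd) n) x) p.2)) := by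
      unfold pvStepA
      rw [PySem.List.slice_from_one, List.tail_cons]
      by_cases hcond : ((rest.map Prod.fst).all (fun k =>
          (pvLookupA (((k0, l0) :: rest).map (fun p => (p.1, pvKeep b p.2))) k).contains n)) = true
      · rw [if_pos hcond]
        simp only [hmin]
        have hlen : (PySem.List.pyRange 0 ((pvMC l0 (rest.map Prod.snd) n : Nat) : Int) 1).length
            = pvMC l0 (rest.map Prod.snd) n := by
          rw [PySem.List.length_pyRange_one]
          simp
        have hinner : ∀ (dd : List (String × List Int)) (key : String),
            (PySem.List.pyRange 0 ((pvMC l0 (rest.map Prod.snd) n : Nat) : Int) 1).foldl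
              (fun dd _ => pvRemoveOnceA dd key n) dd
            = pvUpd ((fun l => (PySem.List.remove? l n).getD l)^[pvMC l0 (rest.map Prod.snd) n]) key dd := by
          intro dd key
          rw [foldl_const_iterate _ (fun dd => pvRemoveOnceA dd key n) dd, hlen]
          rw [show (fun dd => pvRemoveOnceA dd key n)
              = (fun dd => pvUpd (fun l => (PySem.List.remove? l n).getD l) key dd) from rfl]
          rw [pvUpd_iter]
        rw [show (fun (dd : List (String × List Int)) (key : String) =>
              (PySem.List.pyRange 0 ((pvMC l0 (rest.map Prod.snd) n : Nat) : Int) 1).foldl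
                (fun dd _ => pvRemoveOnceA dd key n) dd)
            = (fun (dd : List (String × List Int)) (key : String) =>
              pvUpd ((fun l => (PySem.List.remove? l n).getD l)^[pvMC l0 (rest.map Prod.snd) n]) key dd)
            from funext fun dd => funext fun key => hinner dd key]
        rw [foldl_pvUpd _ _ _ hndk, List.map_map]
        apply List.map_congr_left
        intro p hp
        have hpk : p.1 ∈ k0 :: rest.map Prod.fst := by
          have h1 := List.mem_map_of_mem (f := Prod.fst) hp
          simpa using h1
        simp only [Function.comp_apply, if_pos hpk]
        rw [rm1_iter, pvKeep_comp]
      · rw [if_neg hcond]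
        -- n is absent from some other (current) list, so its min count over all lists is 0
        have hM : pvMC l0 (rest.map Prod.snd) n = 0 := by
          rw [Bool.not_eq_true] at hcond
          obtain ⟨k, hkmem, hkf⟩ := List.all_eq_false.mp hcond
          obtain ⟨p, hp, hpk⟩ := List.mem_map.mp hkmem
          rw [← hpk] at hkf
          rw [lookup_map_nodup ((k0, l0) :: rest) (pvKeep b) p hnd (List.mem_cons_of_mem _ hp)] at hkf
          have hnot : n ∉ pvKeep b p.2 := by simpa using hkf
          have hc0 : List.count n p.2 = 0 := by
            rw [← hcnt p (List.mem_cons_of_mem _ hp)]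
            exact List.count_eq_zero.mpr hnot
          have hle := minFold_le_mem (rest.map Prod.snd) n p.2
            (List.mem_map_of_mem (f := Prod.snd) hp) (List.count n l0)
          unfold pvMC
          omega
        have hbud : (fun x => b x + pvSingle n (pvMC l0 (rest.map Prod.snd) n) x) = b := by
          funext x
          simp [pvSingle, hM]
        rw [hbud]
    have hb2 : ∀ m ∈ t, (fun x => b x + pvSingle n (pvMC l0 (rest.map Prod.snd) n) x) m = 0 := by
      intro m hm
      have hmn : m ≠ n := fun e => hnt (e ▸ hm)
      simp [pvSingle, hmn, hbt m hm]
    rw [hstep, ih _ ht hb2]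
    congr 1
    funext p
    congr 2
    funext x
    by_cases hx : x = n
    · subst hx
      simp [pvSingle, hnt]
    · simp [pvSingle, hx, List.mem_cons]

-- ===== VERDICT (by name: the statement is the Claim_ definition above) =====
theorem remove_common_elements_spec : Claim_equal_remove_common_elements := by
  unfold Claim_equal_remove_common_elements
  intro d _ hpre
  unfold Spec_remove_common_elements
  cases d with
  | nil => rfl
  | cons hd rest =>
    obtain ⟨k0, l0⟩ := hd
    unfold Pre_remove_common_elements at hpre
    have hbase : pvLookupA ((k0, l0) :: rest) k0 = l0 := by
      simp [pvLookupA, List.find?]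
    rw [show remove_common_elements ((k0, l0) :: rest)
        = (PySem.Set.ofList (pvLookupA ((k0, l0) :: rest) k0)).foldl (pvStepA k0 rest)
            ((k0, l0) :: rest) from rfl]
    rw [show remove_common_elements_alt ((k0, l0) :: rest)
        = ((k0, l0) :: rest).map (fun p => (p.1,
            pvBudgetPass (rest.foldl (fun c p => pvInterStep c p.2) (pvCounterOf l0)) p.2)) from rfl]
    rw [hbase]
    have hid : ((k0, l0) :: rest)
        = ((k0, l0) :: rest).map (fun p => (p.1, pvKeep (fun _ => 0) p.2)) := by
      rw [show (fun (p : String × List Int) => (p.1, pvKeep (fun _ => 0) p.2))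
          = (fun p => p) from funext fun p => by rw [pvKeep_zero]]
      simp
    conv_lhs => rw [hid]
    rw [loopA_invariant k0 l0 rest hpre (PySem.Set.ofList l0) (fun _ => 0)
      (PySem.Set.nodup_ofList l0) (fun _ _ => rfl)]
    apply List.map_congr_left
    intro p hp
    have hpass : pvBudgetPass (rest.foldl (fun c p => pvInterStep c p.2) (pvCounterOf l0)) p.2
        = pvKeep (fun x => ((rest.foldl (fun c p => pvInterStep c p.2) (pvCounterOf l0)).getD x 0).toNat) p.2 := by
      unfold pvBudgetPass
      rw [pvBudgetPass_aux, List.nil_append]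
    rw [hpass]
    congr 2
    funext x
    rw [common_getD, Int.toNat_natCast]
    by_cases hx : x ∈ PySem.Set.ofList l0
    · simp [hx]
    · have hxl : x ∉ l0 := fun h => hx ((PySem.Set.mem_ofList _ _).mpr h)
      have hc0 : List.count x l0 = 0 := List.count_eq_zero.mpr hxl
      have hle := minFold_le_init (rest.map Prod.snd) x (List.count x l0)
      simp only [if_neg hx]
      unfold pvMC
      omega
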